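-- pv_equiv track=rewrite | github.com/qkaTlehdrnf/SSW | SSW_KnightAttack.py | make_inf_board
-- ===== SOURCE A (Python) =====
-- movable_L=[[1,2],[2,1],[-2,-1],[-1,-2],[-1,2],[2,-1],[1,-2],[-2,1]]
--
-- def make_board(board_size):
--     return [[0]*board_size[1] for _ in range(board_size[0])]
--
-- def search_possibilities(board_size,y,x):
--     leny=board_size[0]
--     lenx=board_size[1]
--     movable1=[]
--     for i in movable_L:
--         movable1.append(list([y,x][j]+i[j] for j in range(2)))
--     movable2=[]
--     for i in movable1:
--         if 0<=i[0]<leny and 0<=i[1]<lenx: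
--             movable2.append(i)
--     return movable2
--
-- def make_inf_board(board,board_size):
--     inf_board=make_board(board_size)
--     for y in range(board_size[0]):
--         for x in range(board_size[1]):
--             if board[y][x]==1:
--                 inf_board[y][x]+=1
--             movable=search_possibilities(board_size,y,x)
--             for pos in movable:
--                 if board[pos[0]][pos[1]]==1:
--                     inf_board[y][x]+=1
--     return inf_board
-- ===== SOURCE B (Python) =====
-- # Scatter version: start from a zero board and push contributions out of each
-- # MARKED cell (self + its in-bounds knight neighbors); correct because the
-- # knight-move set is symmetric under negation.
-- def make_inf_board(board, board_size):
--     R, C = board_size[0], board_size[1]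
--     inf_board = [[0] * C for _ in range(R)]
--     for a in range(R):
--         for b in range(C):
--             if board[a][b] == 1:
--                 inf_board[a][b] += 1
--                 for da, db in ((1,2),(2,1),(-2,-1),(-1,-2),(-1,2),(2,-1),(1,-2),(-2,1)):
--                     na, nb = a + da, b + db
--                     if 0 <= na < R and 0 <= nb < C:
--                         inf_board[na][nb] += 1
--     return inf_board
-- ===== Notes on version B (the rewrite author's own statement) =====
-- stated objective: alternative
-- what changed: Replaced the per-cell gather (each cell scans its knight neighbors via a helper that builds candidate/filtered move lists) by a scatter pass over a zero board that touches only MARKED cells and pushes +1 to the cell itself and to each in-bounds knight neighbor, relying on the negation symmetry of the knight-move set.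
-- outside the precondition, e.g. on make_inf_board([], [0]): A returns [], B raises IndexError; on make_inf_board([], [2, 0]): A returns [[], []], B returns [[], []]
import Mathlib
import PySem

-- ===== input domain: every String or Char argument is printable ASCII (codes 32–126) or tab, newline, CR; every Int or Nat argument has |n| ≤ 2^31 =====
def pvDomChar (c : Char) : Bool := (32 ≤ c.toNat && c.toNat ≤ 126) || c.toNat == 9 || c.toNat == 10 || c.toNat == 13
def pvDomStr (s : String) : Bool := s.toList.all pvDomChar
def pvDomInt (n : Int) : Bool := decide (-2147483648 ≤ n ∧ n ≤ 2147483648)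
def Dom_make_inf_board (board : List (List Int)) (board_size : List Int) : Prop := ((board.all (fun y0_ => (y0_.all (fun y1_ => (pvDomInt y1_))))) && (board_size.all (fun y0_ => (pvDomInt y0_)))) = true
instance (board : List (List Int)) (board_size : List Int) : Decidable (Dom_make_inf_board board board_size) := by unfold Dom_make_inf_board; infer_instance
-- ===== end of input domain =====

-- B replaces A's per-cell gather (helper-built move lists probed from every cell) by a
-- scatter pass that touches only marked cells and pushes +1 to self and in-bounds knight
-- neighbors; equal because the knight-move set is symmetric under negation. Objective:
-- alternative (a genuinely different traversal of the same cost).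

-- ===== PORT A =====
-- board[y][x] read: indices here are nonnegative and, under Pre_, in range (Python raises
-- IndexError otherwise, which Pre_ excludes), so getD is exact on the admitted inputs.
def cellAt (board : List (List Int)) (y x : Int) : Int :=
  (board.getD y.toNat []).getD x.toNat 0

-- inf_board[y][x] += 1 (indices always in range where the ports use it)
def bumpAt (m : List (List Int)) (y x : Nat) : List (List Int) :=
  m.modify y (fun row => row.modify x (· + 1))

def movable_L : List (Int × Int) := [(1,2),(2,1),(-2,-1),(-1,-2),(-1,2),(2,-1),(1,-2),(-2,1)]

-- [[0]*board_size[1] for _ in range(board_size[0])]  ([0]*n is empty for n ≤ 0, as is range(n))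
def make_board (board_size : List Int) : List (List Int) :=
  (List.range (board_size.getD 0 0).toNat).map (fun _ => List.replicate (board_size.getD 1 0).toNat 0)

def search_possibilities (board_size : List Int) (y x : Int) : List (Int × Int) :=
  let leny := board_size.getD 0 0
  let lenx := board_size.getD 1 0
  let movable1 := movable_L.map (fun i => (y + i.1, x + i.2))
  movable1.filter (fun i => decide (0 ≤ i.1 ∧ i.1 < leny ∧ 0 ≤ i.2 ∧ i.2 < lenx))

def make_inf_board (board : List (List Int)) (board_size : List Int) : List (List Int) :=
  let inf0 := make_board board_size
  (List.range (board_size.getD 0 0).toNat).foldl (fun inf (y : Nat) =>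
    (List.range (board_size.getD 1 0).toNat).foldl (fun inf (x : Nat) =>
      let inf1 := if cellAt board ↑y ↑x == 1 then bumpAt inf y x else inf
      (search_possibilities board_size ↑y ↑x).foldl
        (fun m pos => if cellAt board pos.1 pos.2 == 1 then bumpAt m y x else m) inf1) inf) inf0

-- ===== PORT B =====
def make_inf_board_alt (board : List (List Int)) (board_size : List Int) : List (List Int) :=
  let R := board_size.getD 0 0
  let C := board_size.getD 1 0
  let inf0 := (List.range R.toNat).map (fun _ => List.replicate C.toNat 0)
  (List.range R.toNat).foldl (fun inf (a : Nat) =>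
    (List.range C.toNat).foldl (fun inf (b : Nat) =>
      if cellAt board ↑a ↑b == 1 then
        ([(1,2),(2,1),(-2,-1),(-1,-2),(-1,2),(2,-1),(1,-2),(-2,1)] : List (Int × Int)).foldl (fun m o =>
          let na : Int := ↑a + o.1
          let nb : Int := ↑b + o.2
          if 0 ≤ na ∧ na < R ∧ 0 ≤ nb ∧ nb < C then bumpAt m na.toNat nb.toNat else m)
          (bumpAt inf a b)
      else inf) inf) inf0

-- ===== PRECONDITION & SPEC =====
-- Python A raises IndexError when board_size has fewer than 2 entries or when board does not
-- cover the declared board_size[0] rows of board_size[1] cells each.  Pre_ also excludes two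
-- degenerate corners on which A still returns: a board_size of fewer than 2 entries with
-- board_size[0] <= 0 (A returns [] without ever reading board_size[1], while B reads it and
-- raises IndexError), and a board smaller than the declared size when board_size[1] <= 0
-- (no cell is ever read, so both programs return the same empty rows); see the cites.
def Pre_make_inf_board (board : List (List Int)) (board_size : List Int) : Prop :=
  2 ≤ board_size.length ∧ board_size.getD 0 0 ≤ (board.length : Int) ∧
    ∀ row ∈ board.take (board_size.getD 0 0).toNat, board_size.getD 1 0 ≤ (row.length : Int)
instance (board : List (List Int)) (board_size : List Int) : Decidable (Pre_make_inf_board board board_size) := by unfold Pre_make_inf_board; infer_instance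

def pvWitness_make_inf_board : List (List Int) × List Int :=
  ([[1, 0, 0], [0, 0, 1], [0, 1, 0]], [3, 3])

def Spec_make_inf_board (board : List (List Int)) (board_size : List Int) (out : List (List Int)) : Prop := out = make_inf_board_alt board board_size
instance (board : List (List Int)) (board_size : List Int) (out : List (List Int)) : Decidable (Spec_make_inf_board board board_size out) := by unfold Spec_make_inf_board; infer_instance

-- ===== CLAIM (what is proved, stated in full; the proofs are below) =====
def Claim_equal_make_inf_board : Prop := ∀ (board : List (List Int)) (board_size : List Int), Dom_make_inf_board board board_size → Pre_make_inf_board board board_size → Spec_make_inf_board board board_size (make_inf_board board board_size)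

-- ===== LEMMAS AND PROOFS =====

-- mark board a b : the cell (a,b) is marked
def mark (board : List (List Int)) (a b : Nat) : Bool :=
  (board.getD a []).getD b 0 == 1

-- in-bounds knight neighbors of (a,b) on an RI × CI board, as Nat pairs
def nbrs (RI CI : Int) (a b : Nat) : List (Nat × Nat) :=
  movable_L.filterMap (fun o =>
    if 0 ≤ (a : Int) + o.1 ∧ (a : Int) + o.1 < RI ∧ 0 ≤ (b : Int) + o.2 ∧ (b : Int) + o.2 < CI
    then some (((a : Int) + o.1).toNat, ((b : Int) + o.2).toNat) else none)

-- board entry read at (i,j) as Nat indices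
def valAt (m : List (List Int)) (i j : Nat) : Int := (m.getD i []).getD j 0

-- a sequence of +1 writes applied to a board
def applyB (ps : List (Nat × Nat)) (m : List (List Int)) : List (List Int) :=
  ps.foldl (fun m p => bumpAt m p.1 p.2) m

def Shaped (R C : Nat) (m : List (List Int)) : Prop :=
  m.length = R ∧ ∀ (j : Nat) (h : j < m.length), m[j].length = C


-- grid of all board cells
def grid (R C : Nat) : List (Nat × Nat) := (List.range R) ×ˢ (List.range C)

-- the bump positions A's loop body produces at cell p
def listA (board : List (List Int)) (board_size : List Int) (p : Nat × Nat) : List (Nat × Nat) :=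
  (if mark board p.1 p.2 then [p] else []) ++
    (search_possibilities board_size ↑p.1 ↑p.2).filterMap
      (fun pos => if cellAt board pos.1 pos.2 == 1 then some p else none)

-- the bump positions B's loop body produces at cell p
def listB (board : List (List Int)) (RI CI : Int) (p : Nat × Nat) : List (Nat × Nat) :=
  if mark board p.1 p.2 then p :: nbrs RI CI p.1 p.2 else []

theorem mem_grid {R C : Nat} {p : Nat × Nat} : p ∈ grid R C ↔ p.1 < R ∧ p.2 < C := by
  obtain ⟨a, b⟩ := p
  simp [grid, List.mem_product]

theorem nodup_grid (R C : Nat) : (grid R C).Nodup :=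
  (List.nodup_range).product (List.nodup_range)

theorem shaped_bumpAt {R C : Nat} {m : List (List Int)} (hm : Shaped R C m) (y x : Nat) :
    Shaped R C (bumpAt m y x) := by
  obtain ⟨h1, h2⟩ := hm
  refine ⟨by simp [bumpAt, h1], ?_⟩
  intro j hj
  have hj' : j < m.length := by simpa [bumpAt] using hj
  simp only [bumpAt, List.getElem_modify]
  split
  · simpa using h2 j hj'
  · exact h2 j hj'

theorem valAt_bumpAt {R C : Nat} {m : List (List Int)} (hm : Shaped R C m)
    {i j y x : Nat} (hi : i < R) (hj : j < C) :
    valAt (bumpAt m y x) i j = valAt m i j + (if (y, x) = (i, j) then 1 else 0) := by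
  obtain ⟨h1, h2⟩ := hm
  have hi' : i < m.length := by omega
  have hj' : j < m[i].length := by rw [h2 i hi']; omega
  have hrow : (m[i].modify x (· + 1)).length = m[i].length := by simp
  have hib : i < (m.modify y (fun row => row.modify x (· + 1))).length := by
    simp; omega
  unfold valAt bumpAt
  rw [List.getD_eq_getElem _ _ hib, List.getD_eq_getElem _ _ hi']
  rw [List.getElem_modify]
  by_cases hy : y = i
  · subst hy
    simp only [reduceIte]
    rw [List.getD_eq_getElem _ _ (by rw [hrow]; exact hj'), List.getD_eq_getElem _ _ hj']
    rw [List.getElem_modify]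
    by_cases hx : x = j
    · subst hx; simp
    · simp [Prod.ext_iff, fun h : x = j => hx h]
  · rw [if_neg hy]
    have : ¬ ((y, x) = (i, j)) := by simp [Prod.ext_iff]; intro h; omega
    simp [this]

theorem shaped_applyB {R C : Nat} (ps : List (Nat × Nat)) {m : List (List Int)}
    (hm : Shaped R C m) : Shaped R C (applyB ps m) := by
  induction ps generalizing m with
  | nil => exact hm
  | cons p t ih => exact ih (shaped_bumpAt hm p.1 p.2)

theorem valAt_applyB {R C : Nat} {ps : List (Nat × Nat)} {m : List (List Int)}
    (hm : Shaped R C m) {i j : Nat} (hi : i < R) (hj : j < C) :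
    valAt (applyB ps m) i j = valAt m i j + ps.count (i, j) := by
  induction ps generalizing m with
  | nil => simp [applyB]
  | cons p t ih =>
    have : applyB (p :: t) m = applyB t (bumpAt m p.1 p.2) := rfl
    rw [this, ih (shaped_bumpAt hm p.1 p.2), valAt_bumpAt hm hi hj]
    rw [List.count_cons]
    by_cases hp : p = (i, j)
    · subst hp; simp; omega
    · simp [hp]

theorem applyB_append (l₁ l₂ : List (Nat × Nat)) (m : List (List Int)) :
    applyB (l₁ ++ l₂) m = applyB l₂ (applyB l₁ m) := by
  simp [applyB, List.foldl_append]

-- A's inner loop: conditional bumps at a FIXED cell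
theorem foldl_condBumpA {α : Type} (l : List α) (c : α → Bool) (y x : Nat)
    (m : List (List Int)) :
    l.foldl (fun m p => if c p then bumpAt m y x else m) m =
      applyB (l.filterMap (fun p => if c p then some ((y, x) : Nat × Nat) else none)) m := by
  induction l generalizing m with
  | nil => rfl
  | cons a t ih =>
    by_cases h : c a
    · simp [h, ih, applyB]
    · simp [h, ih]

-- B's inner loop: conditional bumps at a cell computed from the element
theorem foldl_condBumpB {α : Type} (l : List α) (c : α → Prop) [DecidablePred c]
    (g1 g2 : α → Nat) (m : List (List Int)) :
    l.foldl (fun m p => if c p then bumpAt m (g1 p) (g2 p) else m) m =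
      applyB (l.filterMap (fun p => if c p then some ((g1 p, g2 p) : Nat × Nat) else none)) m := by
  induction l generalizing m with
  | nil => rfl
  | cons a t ih =>
    by_cases h : c a
    · simp [h, ih, applyB]
    · simp [h, ih]

theorem foldl_applyB_flatMap {α : Type} (l : List α) (g : α → List (Nat × Nat))
    (m : List (List Int)) :
    l.foldl (fun m e => applyB (g e) m) m = applyB (l.flatMap g) m := by
  induction l generalizing m with
  | nil => rfl
  | cons a t ih => simp [List.flatMap_cons, applyB_append, ih]

theorem foldl_product {M : Type} (l₁ l₂ : List Nat) (f : M → Nat × Nat → M) (m : M) :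
    (l₁ ×ˢ l₂).foldl f m = l₁.foldl (fun acc y => l₂.foldl (fun acc x => f acc (y, x)) acc) m := by
  induction l₁ generalizing m with
  | nil => rfl
  | cons a t ih => simp [List.product_cons, List.foldl_append, List.foldl_map, ih]

theorem filterMap_if_eq_map_filter_bool {α β : Type} (l : List α) (c : α → Bool) (g : α → β) :
    l.filterMap (fun o => if c o then some (g o) else none) = (l.filter c).map g := by
  induction l with
  | nil => rfl
  | cons a t ih => by_cases h : c a <;> simp [h, ih]

theorem movable_L_neg_mem : ∀ o ∈ movable_L, (-o.1, -o.2) ∈ movable_L := by decide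

theorem movable_L_nodup : movable_L.Nodup := by decide

theorem mem_nbrs {RI CI : Int} {a b : Nat} {q : Nat × Nat} :
    q ∈ nbrs RI CI a b ↔ ∃ o ∈ movable_L,
      (0 ≤ (a : Int) + o.1 ∧ (a : Int) + o.1 < RI ∧ 0 ≤ (b : Int) + o.2 ∧ (b : Int) + o.2 < CI) ∧
        ((a : Int) + o.1).toNat = q.1 ∧ ((b : Int) + o.2).toNat = q.2 := by
  unfold nbrs
  rw [List.mem_filterMap]
  constructor
  · rintro ⟨o, ho, he⟩
    by_cases hc : 0 ≤ (a : Int) + o.1 ∧ (a : Int) + o.1 < RI ∧ 0 ≤ (b : Int) + o.2 ∧ (b : Int) + o.2 < CI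
    · rw [if_pos hc] at he
      obtain ⟨h1, h2⟩ := Prod.mk.injEq .. ▸ (Option.some.injEq .. ▸ he :
        (((a : Int) + o.1).toNat, ((b : Int) + o.2).toNat) = q)
      exact ⟨o, ho, hc, h1, h2⟩
    · rw [if_neg hc] at he; cases he
  · rintro ⟨o, ho, hc, h1, h2⟩
    refine ⟨o, ho, ?_⟩
    rw [if_pos hc, h1, h2]

theorem mem_nbrs_symm_mp {RI CI : Int} {a b i j : Nat}
    (ha : (a : Int) < RI) (hb : (b : Int) < CI) :
    (i, j) ∈ nbrs RI CI a b → (a, b) ∈ nbrs RI CI i j := by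
  intro h
  rw [mem_nbrs] at h ⊢
  obtain ⟨o, ho, hc, h1, h2⟩ := h
  refine ⟨(-o.1, -o.2), movable_L_neg_mem o ho, ?_, ?_, ?_⟩ <;> simp at h1 h2 ⊢ <;> omega

theorem mem_nbrs_symm {RI CI : Int} {a b i j : Nat}
    (ha : (a : Int) < RI) (hb : (b : Int) < CI) (hi : (i : Int) < RI) (hj : (j : Int) < CI) :
    ((i, j) ∈ nbrs RI CI a b ↔ (a, b) ∈ nbrs RI CI i j) :=
  ⟨mem_nbrs_symm_mp ha hb, mem_nbrs_symm_mp hi hj⟩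

theorem nodup_nbrs (RI CI : Int) (a b : Nat) : (nbrs RI CI a b).Nodup := by
  apply List.Nodup.filterMap ?_ movable_L_nodup
  intro o o' q hq hq'
  simp only [Option.mem_def] at hq hq'
  split at hq
  case isFalse => cases hq
  case isTrue hc =>
    split at hq'
    case isFalse => cases hq'
    case isTrue hc' =>
      obtain ⟨e1, e2⟩ := Prod.mk.injEq .. ▸ (Option.some.injEq .. ▸ hq :
        (((a : Int) + o.1).toNat, ((b : Int) + o.2).toNat) = q)
      obtain ⟨e1', e2'⟩ := Prod.mk.injEq .. ▸ (Option.some.injEq .. ▸ hq' :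
        (((a : Int) + o'.1).toNat, ((b : Int) + o'.2).toNat) = q)
      have : o.1 = o'.1 := by omega
      have : o.2 = o'.2 := by omega
      exact Prod.ext ‹o.1 = o'.1› ‹o.2 = o'.2›

theorem nbrs_bounds {RI CI : Int} {a b : Nat} {q : Nat × Nat} (hq : q ∈ nbrs RI CI a b) :
    q.1 < RI.toNat ∧ q.2 < CI.toNat := by
  rw [mem_nbrs] at hq
  obtain ⟨o, ho, hc, h1, h2⟩ := hq
  omega

theorem sum_map_ite_eq {l : List (Nat × Nat)} (hnd : l.Nodup) {c : Nat × Nat}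
    (hc : c ∈ l) (f : Nat × Nat → Nat) :
    (l.map (fun p => if p = c then f p else 0)).sum = f c := by
  induction l with
  | nil => cases hc
  | cons a t ih =>
    rcases List.nodup_cons.mp hnd with ⟨hna, hnt⟩
    rcases List.mem_cons.mp hc with h | h
    · subst h
      have hz : ∀ p ∈ t, (if p = c then f p else 0) = 0 := by
        intro p hp
        rw [if_neg]; rintro rfl; exact hna hp
      simp only [List.map_cons, List.sum_cons]
      rw [List.map_congr_left hz]
      simp
    · have hne : a ≠ c := by rintro rfl; exact hna h
      simp only [List.map_cons, List.sum_cons, if_neg hne]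
      rw [ih hnt h]
      simp

theorem sum_map_filter {α : Type} (l : List α) (c : α → Bool) (f : α → Nat) :
    ((l.filter c).map f).sum = (l.map (fun p => if c p then f p else 0)).sum := by
  induction l with
  | nil => rfl
  | cons a t ih => by_cases h : c a <;> simp [h, ih]

theorem sum_map_ite_mem {l s : List (Nat × Nat)} (hl : l.Nodup) (hs : s.Nodup)
    (hsub : ∀ q ∈ s, q ∈ l) (f : Nat × Nat → Nat) :
    (l.map (fun p => if p ∈ s then f p else 0)).sum = (s.map f).sum := by
  have hperm : (l.filter (fun p => decide (p ∈ s))).Perm s := by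
    rw [List.perm_ext_iff_of_nodup (hl.filter _) hs]
    intro q
    simp only [List.mem_filter, decide_eq_true_eq]
    exact ⟨fun h => h.2, fun h => ⟨hsub q h, h⟩⟩
  calc (l.map (fun p => if p ∈ s then f p else 0)).sum
      = ((l.filter (fun p => decide (p ∈ s))).map f).sum := by
        rw [sum_map_filter]
        apply congrArg
        apply List.map_congr_left
        intro p _
        by_cases h : p ∈ s <;> simp [h]
    _ = (s.map f).sum := (hperm.map f).sum_eq

theorem countP_eq_sum_map {l : List (Nat × Nat)} (c : Nat × Nat → Bool) :
    (l.map (fun x => if c x then 1 else 0)).sum = l.countP c := by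
  induction l with
  | nil => rfl
  | cons a t ih =>
    by_cases h : c a
    · simp [h, ih]
      omega
    · simp [h, ih]
theorem mark_eq (board : List (List Int)) (y x : Nat) :
    (cellAt board ↑y ↑x == 1) = mark board y x := by
  simp [cellAt, mark]

theorem shaped_make_board (bs : List Int) :
    Shaped (bs.getD 0 0).toNat (bs.getD 1 0).toNat (make_board bs) := by
  constructor
  · simp [make_board]
  · intro j hj
    simp [make_board] at hj ⊢

theorem A_eq (board : List (List Int)) (bs : List Int) :
    make_inf_board board bs =
      applyB ((grid (bs.getD 0 0).toNat (bs.getD 1 0).toNat).flatMap (listA board bs))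
        (make_board bs) := by
  rw [← foldl_applyB_flatMap]
  unfold grid
  rw [foldl_product]
  unfold make_inf_board
  apply PySem.List.foldl_congr_mem
  intro m y _
  apply PySem.List.foldl_congr_mem
  intro m' x _
  show (search_possibilities bs ↑y ↑x).foldl
      (fun m'' pos => if cellAt board pos.1 pos.2 == 1 then bumpAt m'' y x else m'')
      (if cellAt board ↑y ↑x == 1 then bumpAt m' y x else m') = applyB (listA board bs (y, x)) m'
  have hcb := foldl_condBumpA (search_possibilities bs ↑y ↑x)
    (fun pos => cellAt board pos.1 pos.2 == 1) y x
    (if cellAt board ↑y ↑x == 1 then bumpAt m' y x else m')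
  refine hcb.trans ?_
  unfold listA
  rw [applyB_append]
  congr 1
  by_cases h : cellAt board ↑y ↑x == 1
  · rw [if_pos h, if_pos (show mark board (y, x).1 (y, x).2 by rwa [mark_eq] at h)]
    rfl
  · rw [if_neg h, if_neg (show ¬ (mark board (y, x).1 (y, x).2 = true) by rwa [mark_eq] at h)]
    rfl

-- B's loop is the bump sequence flatMapped from its per-cell scatter lists
theorem B_eq (board : List (List Int)) (bs : List Int) :
    make_inf_board_alt board bs =
      applyB ((grid (bs.getD 0 0).toNat (bs.getD 1 0).toNat).flatMap
        (listB board (bs.getD 0 0) (bs.getD 1 0))) (make_board bs) := by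
  rw [← foldl_applyB_flatMap]
  unfold grid
  rw [foldl_product]
  unfold make_inf_board_alt
  apply PySem.List.foldl_congr_mem
  intro m a _
  apply PySem.List.foldl_congr_mem
  intro m' b _
  show (if cellAt board ↑a ↑b == 1 then
      ([(1,2),(2,1),(-2,-1),(-1,-2),(-1,2),(2,-1),(1,-2),(-2,1)] : List (Int × Int)).foldl (fun m'' o =>
        if 0 ≤ (a : Int) + o.1 ∧ (a : Int) + o.1 < bs.getD 0 0 ∧
            0 ≤ (b : Int) + o.2 ∧ (b : Int) + o.2 < bs.getD 1 0 then
          bumpAt m'' ((a : Int) + o.1).toNat ((b : Int) + o.2).toNat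
        else m'') (bumpAt m' a b)
    else m') = applyB (listB board (bs.getD 0 0) (bs.getD 1 0) (a, b)) m'
  unfold listB
  by_cases h : cellAt board ↑a ↑b == 1
  · rw [if_pos h, if_pos (show mark board (a, b).1 (a, b).2 by rwa [mark_eq] at h)]
    have hcb := foldl_condBumpB ([(1,2),(2,1),(-2,-1),(-1,-2),(-1,2),(2,-1),(1,-2),(-2,1)] : List (Int × Int))
      (fun o : Int × Int => 0 ≤ (a : Int) + o.1 ∧ (a : Int) + o.1 < bs.getD 0 0 ∧
        0 ≤ (b : Int) + o.2 ∧ (b : Int) + o.2 < bs.getD 1 0)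
      (fun o : Int × Int => ((a : Int) + o.1).toNat) (fun o : Int × Int => ((b : Int) + o.2).toNat)
      (bumpAt m' a b)
    refine hcb.trans ?_
    show applyB (nbrs (bs.getD 0 0) (bs.getD 1 0) a b) (applyB [(a, b)] m') = _
    rw [← applyB_append]
    rfl
  · rw [if_neg h, if_neg (show ¬ (mark board (a, b).1 (a, b).2 = true) by rwa [mark_eq] at h)]
    rfl
-- generic form of nbrs_eq_map_search, by induction over the offset list
theorem nbrs_eq_map_search_gen (board_size : List Int) (y x : Nat) (l : List (Int × Int)) :
    l.filterMap (fun o =>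
        if 0 ≤ (y : Int) + o.1 ∧ (y : Int) + o.1 < board_size.getD 0 0 ∧
            0 ≤ (x : Int) + o.2 ∧ (x : Int) + o.2 < board_size.getD 1 0
        then some (((y : Int) + o.1).toNat, ((x : Int) + o.2).toNat) else none) =
      ((l.map (fun i => ((y : Int) + i.1, (x : Int) + i.2))).filter
        (fun i => decide (0 ≤ i.1 ∧ i.1 < board_size.getD 0 0 ∧
          0 ≤ i.2 ∧ i.2 < board_size.getD 1 0))).map (fun p => (p.1.toNat, p.2.toNat)) := by
  induction l with
  | nil => rfl
  | cons o t ih =>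
    rw [List.filterMap_cons, List.map_cons, List.filter_cons]
    by_cases h : 0 ≤ (y : Int) + o.1 ∧ (y : Int) + o.1 < board_size.getD 0 0 ∧
        0 ≤ (x : Int) + o.2 ∧ (x : Int) + o.2 < board_size.getD 1 0
    · rw [if_pos h, if_pos (show (fun i : Int × Int =>
          decide (0 ≤ i.1 ∧ i.1 < board_size.getD 0 0 ∧ 0 ≤ i.2 ∧ i.2 < board_size.getD 1 0))
          ((y : Int) + o.1, (x : Int) + o.2) = true by simpa using h)]
      rw [List.map_cons, ih]
    · rw [if_neg h, if_neg (show ¬ ((fun i : Int × Int =>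
          decide (0 ≤ i.1 ∧ i.1 < board_size.getD 0 0 ∧ 0 ≤ i.2 ∧ i.2 < board_size.getD 1 0))
          ((y : Int) + o.1, (x : Int) + o.2) = true) by simpa using h)]
      rw [ih]

-- nbrs is A's filtered move list with coordinates taken to Nat
theorem nbrs_eq_map_search (board_size : List Int) (y x : Nat) :
    nbrs (board_size.getD 0 0) (board_size.getD 1 0) y x =
      (search_possibilities board_size ↑y ↑x).map (fun p => (p.1.toNat, p.2.toNat)) := by
  unfold nbrs search_possibilities
  exact nbrs_eq_map_search_gen board_size y x movable_L

theorem countP_search (board : List (List Int)) (board_size : List Int) (y x : Nat) :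
    (search_possibilities board_size ↑y ↑x).countP
        (fun pos => cellAt board pos.1 pos.2 == 1) =
      (nbrs (board_size.getD 0 0) (board_size.getD 1 0) y x).countP
        (fun q => mark board q.1 q.2) := by
  rw [nbrs_eq_map_search, List.countP_map]
  apply List.countP_congr
  intro pos _
  simp [cellAt, mark, Function.comp]

theorem count_listA (board : List (List Int)) (board_size : List Int) (p : Nat × Nat)
    (i j : Nat) :
    (listA board board_size p).count (i, j) =
      if p = (i, j) then
        (if mark board i j then 1 else 0) +
          (search_possibilities board_size ↑i ↑j).countP
            (fun pos => cellAt board pos.1 pos.2 == 1)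
      else 0 := by
  unfold listA
  rw [List.count_append, filterMap_if_eq_map_filter_bool, List.map_const', List.count_replicate]
  by_cases hp : p = (i, j)
  · subst hp
    rw [List.countP_eq_length_filter]
    by_cases hm : mark board i j
    · simp [hm]
    · simp [hm]
  · have hb : ¬ ((p == (i, j)) = true) := by simpa using hp
    rw [if_neg hb, if_neg hp]
    by_cases hm : mark board p.1 p.2
    · rw [if_pos hm]; simp [hp]
    · rw [if_neg hm]; simp

theorem count_listB (board : List (List Int)) (RI CI : Int) (p : Nat × Nat) (i j : Nat) :
    (listB board RI CI p).count (i, j) =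
      if mark board p.1 p.2 then
        (if p = (i, j) then 1 else 0) + (if (i, j) ∈ nbrs RI CI p.1 p.2 then 1 else 0)
      else 0 := by
  unfold listB
  by_cases hm : mark board p.1 p.2
  · rw [if_pos hm, if_pos hm, List.count_cons]
    have hmem : (nbrs RI CI p.1 p.2).count (i, j) =
        if (i, j) ∈ nbrs RI CI p.1 p.2 then 1 else 0 := by
      by_cases h : (i, j) ∈ nbrs RI CI p.1 p.2
      · rw [if_pos h, List.count_eq_one_of_mem (nodup_nbrs RI CI p.1 p.2) h]
      · rw [if_neg h, List.count_eq_zero_of_not_mem h]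
    rw [hmem]
    by_cases hp : p = (i, j)
    · rw [if_pos hp]
      have : (p == (i, j)) = true := by simpa using hp
      rw [if_pos this]
      omega
    · rw [if_neg hp]
      have : ¬ ((p == (i, j)) = true) := by simpa using hp
      rw [if_neg this]
      omega
  · rw [if_neg hm, if_neg hm]
    simp

theorem count_PSA (board : List (List Int)) (bs : List Int) {i j : Nat}
    (hi : i < (bs.getD 0 0).toNat) (hj : j < (bs.getD 1 0).toNat) :
    ((grid (bs.getD 0 0).toNat (bs.getD 1 0).toNat).flatMap (listA board bs)).count (i, j) =
      (if mark board i j then 1 else 0) +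
        (nbrs (bs.getD 0 0) (bs.getD 1 0) i j).countP (fun q => mark board q.1 q.2) := by
  rw [List.count_flatMap]
  rw [List.map_congr_left (fun p _ => by
    show (List.count (i, j) ∘ listA board bs) p = _
    exact count_listA board bs p i j)]
  rw [sum_map_ite_eq (nodup_grid _ _) (mem_grid.mpr ⟨hi, hj⟩)]
  rw [countP_search]

theorem count_PSB (board : List (List Int)) (bs : List Int) {i j : Nat}
    (hi : i < (bs.getD 0 0).toNat) (hj : j < (bs.getD 1 0).toNat) :
    ((grid (bs.getD 0 0).toNat (bs.getD 1 0).toNat).flatMap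
        (listB board (bs.getD 0 0) (bs.getD 1 0))).count (i, j) =
      (if mark board i j then 1 else 0) +
        (nbrs (bs.getD 0 0) (bs.getD 1 0) i j).countP (fun q => mark board q.1 q.2) := by
  rw [List.count_flatMap]
  have hpt : ∀ p ∈ grid (bs.getD 0 0).toNat (bs.getD 1 0).toNat,
      (List.count (i, j) ∘ listB board (bs.getD 0 0) (bs.getD 1 0)) p =
        (if p = (i, j) then (if mark board p.1 p.2 then 1 else 0) else 0) +
          (if p ∈ nbrs (bs.getD 0 0) (bs.getD 1 0) i j then
            (if mark board p.1 p.2 then 1 else 0) else 0) := by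
    intro p hp
    obtain ⟨hp1, hp2⟩ := mem_grid.mp hp
    show (listB board (bs.getD 0 0) (bs.getD 1 0) p).count (i, j) = _
    rw [count_listB]
    have hsym : ((i, j) ∈ nbrs (bs.getD 0 0) (bs.getD 1 0) p.1 p.2) ↔
        ((p.1, p.2) ∈ nbrs (bs.getD 0 0) (bs.getD 1 0) i j) :=
      mem_nbrs_symm (by omega) (by omega) (by omega) (by omega)
    have hiff := hsym
    rw [Prod.mk.eta] at hiff
    by_cases hm : mark board p.1 p.2
    · rw [if_pos hm, if_pos hm]
      simp only [hiff]
    · rw [if_neg hm, if_neg hm]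
      simp
  rw [List.map_congr_left hpt, List.sum_map_add]
  congr 1
  · rw [sum_map_ite_eq (nodup_grid _ _) (mem_grid.mpr ⟨hi, hj⟩)]
  · rw [sum_map_ite_mem (nodup_grid _ _) (nodup_nbrs _ _ i j)
      (fun q hq => mem_grid.mpr (nbrs_bounds hq))]
    rw [countP_eq_sum_map]

theorem shaped_ext {R C : Nat} {m1 m2 : List (List Int)} (h1 : Shaped R C m1)
    (h2 : Shaped R C m2) (h : ∀ i j, i < R → j < C → valAt m1 i j = valAt m2 i j) :
    m1 = m2 := by
  obtain ⟨h1l, h1r⟩ := h1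
  obtain ⟨h2l, h2r⟩ := h2
  apply List.ext_getElem (by omega)
  intro i hi1 hi2
  apply List.ext_getElem (by rw [h1r i hi1, h2r i hi2])
  intro j hj1 hj2
  have hv := h i j (by omega) (by rw [← h1r i hi1]; exact hj1)
  unfold valAt at hv
  rw [List.getD_eq_getElem _ _ hi1, List.getD_eq_getElem _ _ hi2,
    List.getD_eq_getElem _ _ hj1, List.getD_eq_getElem _ _ hj2] at hv
  exact hv

-- ===== VERDICT (by name: the statement is the Claim_ definition above) =====
theorem make_inf_board_spec : Claim_equal_make_inf_board := by
  intro board bs _ _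
  unfold Spec_make_inf_board
  rw [A_eq, B_eq]
  apply shaped_ext (shaped_applyB _ (shaped_make_board bs))
    (shaped_applyB _ (shaped_make_board bs))
  intro i j hi hj
  rw [valAt_applyB (shaped_make_board bs) hi hj, valAt_applyB (shaped_make_board bs) hi hj]
  rw [count_PSA board bs hi hj, count_PSB board bs hi hj]
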